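-- pv_equiv track=rewrite | github.com/jhChoi1997/dcase2020_tensorflow | utils.py | get_id_num
-- ===== SOURCE A (Python) =====
-- def get_id_num(file_name):
--     for id_num in range(10):
--         string = 'id_0' + str(id_num)
--         if string in file_name:
--             return id_num
--         else:
--             pass
--     return -1
-- ===== SOURCE B (Python) =====
-- def get_id_num(file_name):
--     best = -1
--     for i in range(len(file_name) - 4):
--         if file_name[i:i+4] == 'id_0':
--             c = file_name[i+4]
--             if c.isdigit():
--                 d = int(c)
--                 if best == -1 or d < best:
--                     best = d
--     return best
-- ===== Notes on version B (the rewrite author's own statement) =====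
-- stated objective: alternative
-- what changed: A probes the string ten times, once per candidate substring 'id_00'..'id_09', returning the first hit; B makes a single left-to-right pass over the string, checking each position for 'id_0'+digit and keeping the minimum digit seen.
import Mathlib
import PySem

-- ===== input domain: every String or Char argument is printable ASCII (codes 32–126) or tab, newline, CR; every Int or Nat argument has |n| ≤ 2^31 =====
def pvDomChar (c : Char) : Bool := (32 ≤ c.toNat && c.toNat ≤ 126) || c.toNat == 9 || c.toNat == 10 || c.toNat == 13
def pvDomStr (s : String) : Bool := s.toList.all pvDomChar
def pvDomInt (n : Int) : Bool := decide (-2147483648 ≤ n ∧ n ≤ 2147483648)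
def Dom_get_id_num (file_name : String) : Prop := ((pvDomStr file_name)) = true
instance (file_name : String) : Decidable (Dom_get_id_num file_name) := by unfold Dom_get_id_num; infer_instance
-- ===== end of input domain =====

-- B replaces A's ten ordered substring probes ('id_00'..'id_09') by one left-to-right
-- scan of the string that keeps the minimum digit following 'id_0' (alternative decomposition).

-- ===== PORT A =====
-- for id_num in range(10): if 'id_0'+str(id_num) in file_name: return id_num; return -1
def pvLoopA (s : List Char) : List Int → Int
  | [] => -1
  | id_num :: rest =>
    if PySem.Chars.isIn ("id_0".toList ++ (PySem.Int.toStr id_num).toList) s then id_num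
    else pvLoopA s rest

def get_id_num (file_name : String) : Int :=
  pvLoopA file_name.toList (PySem.List.pyRange 0 10 1)

-- ===== PORT B =====
-- loop body: if file_name[i:i+4] == 'id_0' and file_name[i+4].isdigit(): keep min digit
def pvStep (s : List Char) (best : Int) (i : Nat) : Int :=
  if (s.drop i).take 4 = ['i', 'd', '_', '0'] then
    match s[i + 4]? with
    | some c =>
      if c.isDigit then
        let d : Int := (c.toNat : Int) - 48
        if best = -1 ∨ d < best then d else best
      else best
    | none => best
  else best

def get_id_num_alt (file_name : String) : Int :=
  (List.range (file_name.toList.length - 4)).foldl (pvStep file_name.toList) (-1)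

-- ===== PRECONDITION & SPEC =====
def Spec_get_id_num (file_name : String) (out : Int) : Prop := out = get_id_num_alt file_name
instance (file_name : String) (out : Int) : Decidable (Spec_get_id_num file_name out) := by unfold Spec_get_id_num; infer_instance

-- ===== CLAIM (what is proved, stated in full; the proofs are below) =====
def Claim_equal_get_id_num : Prop := ∀ (file_name : String), Dom_get_id_num file_name → Spec_get_id_num file_name (get_id_num file_name)

-- ===== LEMMAS AND PROOFS =====

-- the digit B would record at position i, as an Option
def pvMatch (s : List Char) (i : Nat) : Option Int :=
  if (s.drop i).take 4 = ['i', 'd', '_', '0'] then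
    match s[i + 4]? with
    | some c => if c.isDigit then some ((c.toNat : Int) - 48) else none
    | none => none
  else none

def pvMerge (best d : Int) : Int := if best = -1 ∨ d < best then d else best

def pvMatches (s : List Char) : List Int := (List.range (s.length - 4)).filterMap (pvMatch s)

lemma pvStep_eq (s : List Char) (best : Int) (i : Nat) :
    pvStep s best i = match pvMatch s i with | some d => pvMerge best d | none => best := by
  unfold pvStep pvMatch pvMerge
  rcases hg : s[i + 4]? with _ | c
  · simp only [hg]
    split_ifs <;> rfl
  · simp only [hg]
    by_cases hc : c.isDigit <;> split_ifs <;> simp_all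
lemma foldl_step_eq (s : List Char) (l : List Nat) (b : Int) :
    l.foldl (pvStep s) b = (l.filterMap (pvMatch s)).foldl pvMerge b := by
  induction l generalizing b with
  | nil => rfl
  | cons i l ih =>
    simp only [List.foldl_cons, pvStep_eq, List.filterMap_cons]
    cases pvMatch s i <;> simp [ih]

lemma digit_toNat {c : Char} (hc : c.isDigit = true) : 48 ≤ c.toNat ∧ c.toNat ≤ 57 := by
  simp only [Char.isDigit, ge_iff_le, Bool.and_eq_true, decide_eq_true_eq] at hc
  obtain ⟨h1, h2⟩ := hc
  rw [UInt32.le_iff_toNat_le] at h1 h2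
  exact ⟨h1, h2⟩

lemma mem_matches_nonneg {s : List Char} {d : Int} (h : d ∈ pvMatches s) : 0 ≤ d ∧ d < 10 := by
  obtain ⟨i, _, hi⟩ := List.mem_filterMap.mp h
  unfold pvMatch at hi
  rcases hg : s[i + 4]? with _ | c <;> rw [hg] at hi
  · split_ifs at hi <;> simp at hi
  · split_ifs at hi with h4
    · obtain ⟨hc, hrfl⟩ : c.isDigit = true ∧ (c.toNat : Int) - 48 = d := by simpa using hi
      have := digit_toNat hc
      omega

-- occurrence characterisation of membership in pvMatches
lemma mem_matches_iff (s : List Char) (d : Int) :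
    d ∈ pvMatches s ↔ ∃ c : Char, c.isDigit = true ∧ d = (c.toNat : Int) - 48 ∧
      ∃ j, ['i', 'd', '_', '0', c] <+: s.drop j := by
  unfold pvMatches
  rw [List.mem_filterMap]
  constructor
  · rintro ⟨i, _, hi⟩
    unfold pvMatch at hi
    rcases hg : s[i + 4]? with _ | c <;> rw [hg] at hi
    · split_ifs at hi <;> simp at hi
    · split_ifs at hi with h4
      · obtain ⟨hc, hid⟩ : c.isDigit = true ∧ (c.toNat : Int) - 48 = d := by simpa using hi
        refine ⟨c, hc, hid.symm, i, ?_⟩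
        have hlt : 4 < (s.drop i).length := by
          obtain ⟨h', _⟩ := List.getElem?_eq_some_iff.mp hg
          simp only [List.length_drop]
          omega
        rw [List.prefix_iff_eq_take]
        show ['i', 'd', '_', '0', c] = (s.drop i).take 5
        rw [List.take_succ_eq_append_getElem hlt, h4]
        have hc4 : (s.drop i)[4] = c := by
          have h1 : (s.drop i)[4]? = some c := by
            rw [List.getElem?_drop]; exact hg
          obtain ⟨_, he⟩ := List.getElem?_eq_some_iff.mp h1
          exact he
        simp [hc4]
  · rintro ⟨c, hc, rfl, j, hj⟩
    have hlen5 : 5 ≤ (s.drop j).length := by simpa using hj.length_le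
    have hlen5' : 5 ≤ s.length - j := by simpa using hlen5
    have htake : ['i', 'd', '_', '0', c] = (s.drop j).take 5 :=
      List.prefix_iff_eq_take.mp hj
    refine ⟨j, by rw [List.mem_range]; omega, ?_⟩
    have h4 : (s.drop j).take 4 = ['i', 'd', '_', '0'] := by
      have h := congrArg (List.take 4) htake
      rw [List.take_take] at h
      have h45 : min 4 5 = 4 := by norm_num
      rw [h45] at h
      exact h.symm
    have hget : s[j + 4]? = some c := by
      rw [← List.getElem?_drop,
        ← List.getElem?_take_of_lt (l := s.drop j) (i := 4) (j := 5) (by norm_num),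
        ← htake]
      rfl
    unfold pvMatch
    simp [h4, hget, hc]

-- the generic digit-pattern bridge (used at each of the ten literal digits)
lemma probe_char (s : List Char) (c : Char) (hc : c.isDigit = true) :
    (∃ j, ['i', 'd', '_', '0', c] <+: s.drop j) ↔ ((c.toNat : Int) - 48) ∈ pvMatches s := by
  rw [mem_matches_iff]
  constructor
  · rintro ⟨j, hj⟩; exact ⟨c, hc, rfl, j, hj⟩
  · rintro ⟨c', hc', heq, j, hj⟩
    have hn : c'.toNat = c.toNat := by omega
    have hcc : c' = c := by
      have h1 := Char.ofNat_toNat c'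
      have h2 := Char.ofNat_toNat c
      rw [← h1, ← h2, hn]
    subst hcc
    exact ⟨j, hj⟩

-- folding pvMerge from -1 over a nonnegative list picks its least element
lemma foldl_min_eq (l : List Int) (b k : Int) (hk : k = b ∨ k ∈ l) (hkb : k ≤ b)
    (hall : ∀ x ∈ l, k ≤ x) : l.foldl min b = k := by
  induction l generalizing b with
  | nil =>
    rcases hk with rfl | h
    · rfl
    · cases h
  | cons x l ih =>
    have hkx : k ≤ x := hall x (by simp)
    simp only [List.foldl_cons]
    refine ih (min b x) ?_ (by omega) ?_
    · rcases hk with rfl | hx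
      · left; omega
      · rcases List.mem_cons.mp hx with rfl | hl
        · left; omega
        · right; exact hl
    · exact fun y hy => hall y (List.mem_cons_of_mem _ hy)

lemma foldl_merge_nonneg (l : List Int) (b : Int) (hb : 0 ≤ b) (hl : ∀ x ∈ l, 0 ≤ x) :
    l.foldl pvMerge b = l.foldl min b := by
  induction l generalizing b with
  | nil => rfl
  | cons x l ih =>
    have hx := hl x (by simp)
    simp only [List.foldl_cons]
    rw [show pvMerge b x = min b x by unfold pvMerge; split_ifs <;> omega]
    exact ih (min b x) (by omega) (fun y hy => hl y (by simp [hy]))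

lemma matches_min (s : List Char) (k : Int) (hk : k ∈ pvMatches s)
    (hlb : ∀ x ∈ pvMatches s, k ≤ x) : (pvMatches s).foldl pvMerge (-1) = k := by
  have h0 : ∀ y ∈ pvMatches s, 0 ≤ y := fun y hy => (mem_matches_nonneg hy).1
  rcases hM : pvMatches s with _ | ⟨x, rest⟩
  · rw [hM] at hk; cases hk
  · rw [hM] at hk hlb h0
    have hx0 : 0 ≤ x := h0 x (by simp)
    simp only [List.foldl_cons]
    rw [show pvMerge (-1) x = x by unfold pvMerge; simp]
    rw [foldl_merge_nonneg rest x hx0 (fun y hy => h0 y (by simp [hy]))]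
    apply foldl_min_eq rest x k
    · rcases List.mem_cons.mp hk with rfl | hl
      · left; rfl
      · right; exact hl
    · exact hlb x (by simp)
    · exact fun y hy => hlb y (by simp [hy])

lemma alt_eq_fold (file_name : String) :
    get_id_num_alt file_name = (pvMatches file_name.toList).foldl pvMerge (-1) := by
  unfold get_id_num_alt pvMatches
  rw [foldl_step_eq]

theorem get_id_num_spec_aux (s : List Char) :
    pvLoopA s (PySem.List.pyRange 0 10 1) = (pvMatches s).foldl pvMerge (-1) := by
  have hr : PySem.List.pyRange 0 10 1 = [0, 1, 2, 3, 4, 5, 6, 7, 8, 9] := by decide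
  rw [hr]
  have bridge : ∀ (k : Int) (c : Char), c.isDigit = true → ((c.toNat : Int) - 48) = k →
      ("id_0".toList ++ (PySem.Int.toStr k).toList) = ['i', 'd', '_', '0', c] →
      (PySem.Chars.isIn ("id_0".toList ++ (PySem.Int.toStr k).toList) s = true ↔ k ∈ pvMatches s) := by
    intro k c hc hk hpat
    rw [hpat, ← PySem.Chars.exists_prefix_drop_iff_isIn]
    rw [← hk]
    exact probe_char s c hc
  have h0 := bridge 0 '0' (by decide) (by decide) (by decide)
  have h1 := bridge 1 '1' (by decide) (by decide) (by decide)
  have h2 := bridge 2 '2' (by decide) (by decide) (by decide)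
  have h3 := bridge 3 '3' (by decide) (by decide) (by decide)
  have h4 := bridge 4 '4' (by decide) (by decide) (by decide)
  have h5 := bridge 5 '5' (by decide) (by decide) (by decide)
  have h6 := bridge 6 '6' (by decide) (by decide) (by decide)
  have h7 := bridge 7 '7' (by decide) (by decide) (by decide)
  have h8 := bridge 8 '8' (by decide) (by decide) (by decide)
  have h9 := bridge 9 '9' (by decide) (by decide) (by decide)
  have lb : ∀ (k : Int), (∀ j : Int, 0 ≤ j → j < k → j ∉ pvMatches s) →
      ∀ x ∈ pvMatches s, k ≤ x := by
    intro k hnot x hx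
    by_contra hcon
    push_neg at hcon
    obtain ⟨hx0, _⟩ := mem_matches_nonneg hx
    exact hnot x hx0 hcon hx
  by_cases q0 : (0 : Int) ∈ pvMatches s
  · simp only [pvLoopA]
    rw [if_pos (h0.mpr q0)]
    exact (matches_min s 0 q0 (lb 0 (by intro j hj0 hj1 _; omega))).symm
  · by_cases q1 : (1 : Int) ∈ pvMatches s
    · simp only [pvLoopA]
      rw [if_neg (fun h => q0 (h0.mp h)), if_pos (h1.mpr q1)]
      refine (matches_min s 1 q1 (lb 1 ?_)).symm
      intro j hj0 hj1
      interval_cases j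
      · exact q0
    · by_cases q2 : (2 : Int) ∈ pvMatches s
      · simp only [pvLoopA]
        rw [if_neg (fun h => q0 (h0.mp h)), if_neg (fun h => q1 (h1.mp h)),
          if_pos (h2.mpr q2)]
        refine (matches_min s 2 q2 (lb 2 ?_)).symm
        intro j hj0 hj1
        interval_cases j
        · exact q0
        · exact q1
      · by_cases q3 : (3 : Int) ∈ pvMatches s
        · simp only [pvLoopA]
          rw [if_neg (fun h => q0 (h0.mp h)), if_neg (fun h => q1 (h1.mp h)),
            if_neg (fun h => q2 (h2.mp h)), if_pos (h3.mpr q3)]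
          refine (matches_min s 3 q3 (lb 3 ?_)).symm
          intro j hj0 hj1
          interval_cases j
          · exact q0
          · exact q1
          · exact q2
        · by_cases q4 : (4 : Int) ∈ pvMatches s
          · simp only [pvLoopA]
            rw [if_neg (fun h => q0 (h0.mp h)), if_neg (fun h => q1 (h1.mp h)),
              if_neg (fun h => q2 (h2.mp h)), if_neg (fun h => q3 (h3.mp h)),
              if_pos (h4.mpr q4)]
            refine (matches_min s 4 q4 (lb 4 ?_)).symm
            intro j hj0 hj1
            interval_cases j
            · exact q0
            · exact q1
            · exact q2
            · exact q3
          · by_cases q5 : (5 : Int) ∈ pvMatches s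
            · simp only [pvLoopA]
              rw [if_neg (fun h => q0 (h0.mp h)), if_neg (fun h => q1 (h1.mp h)),
                if_neg (fun h => q2 (h2.mp h)), if_neg (fun h => q3 (h3.mp h)),
                if_neg (fun h => q4 (h4.mp h)), if_pos (h5.mpr q5)]
              refine (matches_min s 5 q5 (lb 5 ?_)).symm
              intro j hj0 hj1
              interval_cases j
              · exact q0
              · exact q1
              · exact q2
              · exact q3
              · exact q4
            · by_cases q6 : (6 : Int) ∈ pvMatches s
              · simp only [pvLoopA]
                rw [if_neg (fun h => q0 (h0.mp h)), if_neg (fun h => q1 (h1.mp h)),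
                  if_neg (fun h => q2 (h2.mp h)), if_neg (fun h => q3 (h3.mp h)),
                  if_neg (fun h => q4 (h4.mp h)), if_neg (fun h => q5 (h5.mp h)),
                  if_pos (h6.mpr q6)]
                refine (matches_min s 6 q6 (lb 6 ?_)).symm
                intro j hj0 hj1
                interval_cases j
                · exact q0
                · exact q1
                · exact q2
                · exact q3
                · exact q4
                · exact q5
              · by_cases q7 : (7 : Int) ∈ pvMatches s
                · simp only [pvLoopA]
                  rw [if_neg (fun h => q0 (h0.mp h)), if_neg (fun h => q1 (h1.mp h)),
                    if_neg (fun h => q2 (h2.mp h)), if_neg (fun h => q3 (h3.mp h)),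
                    if_neg (fun h => q4 (h4.mp h)), if_neg (fun h => q5 (h5.mp h)),
                    if_neg (fun h => q6 (h6.mp h)), if_pos (h7.mpr q7)]
                  refine (matches_min s 7 q7 (lb 7 ?_)).symm
                  intro j hj0 hj1
                  interval_cases j
                  · exact q0
                  · exact q1
                  · exact q2
                  · exact q3
                  · exact q4
                  · exact q5
                  · exact q6
                · by_cases q8 : (8 : Int) ∈ pvMatches s
                  · simp only [pvLoopA]
                    rw [if_neg (fun h => q0 (h0.mp h)), if_neg (fun h => q1 (h1.mp h)),
                      if_neg (fun h => q2 (h2.mp h)), if_neg (fun h => q3 (h3.mp h)),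
                      if_neg (fun h => q4 (h4.mp h)), if_neg (fun h => q5 (h5.mp h)),
                      if_neg (fun h => q6 (h6.mp h)), if_neg (fun h => q7 (h7.mp h)),
                      if_pos (h8.mpr q8)]
                    refine (matches_min s 8 q8 (lb 8 ?_)).symm
                    intro j hj0 hj1
                    interval_cases j
                    · exact q0
                    · exact q1
                    · exact q2
                    · exact q3
                    · exact q4
                    · exact q5
                    · exact q6
                    · exact q7
                  · by_cases q9 : (9 : Int) ∈ pvMatches s
                    · simp only [pvLoopA]
                      rw [if_neg (fun h => q0 (h0.mp h)), if_neg (fun h => q1 (h1.mp h)),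
                        if_neg (fun h => q2 (h2.mp h)), if_neg (fun h => q3 (h3.mp h)),
                        if_neg (fun h => q4 (h4.mp h)), if_neg (fun h => q5 (h5.mp h)),
                        if_neg (fun h => q6 (h6.mp h)), if_neg (fun h => q7 (h7.mp h)),
                        if_neg (fun h => q8 (h8.mp h)), if_pos (h9.mpr q9)]
                      refine (matches_min s 9 q9 (lb 9 ?_)).symm
                      intro j hj0 hj1
                      interval_cases j
                      · exact q0
                      · exact q1
                      · exact q2
                      · exact q3
                      · exact q4
                      · exact q5
                      · exact q6
                      · exact q7
                      · exact q8
                    · have hM : pvMatches s = [] := by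
                        rw [List.eq_nil_iff_forall_not_mem]
                        intro x hx
                        obtain ⟨hx0, hx10⟩ := mem_matches_nonneg hx
                        interval_cases x <;> exact absurd hx (by assumption)
                      simp only [pvLoopA]
                      rw [if_neg (fun h => q0 (h0.mp h)), if_neg (fun h => q1 (h1.mp h)),
                        if_neg (fun h => q2 (h2.mp h)), if_neg (fun h => q3 (h3.mp h)),
                        if_neg (fun h => q4 (h4.mp h)), if_neg (fun h => q5 (h5.mp h)),
                        if_neg (fun h => q6 (h6.mp h)), if_neg (fun h => q7 (h7.mp h)),
                        if_neg (fun h => q8 (h8.mp h)), if_neg (fun h => q9 (h9.mp h))]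
                      rw [hM]
                      rfl

-- ===== VERDICT (by name: the statement is the Claim_ definition above) =====
theorem get_id_num_spec : Claim_equal_get_id_num := by
  intro file_name _
  show get_id_num file_name = get_id_num_alt file_name
  rw [alt_eq_fold]
  exact get_id_num_spec_aux file_name.toList
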